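-- pv_equiv track=rewrite | github.com/mangow0527/NL2Cypher | services/cypher_generator_agent/app/preflight.py | _mask_string_literals
-- ===== SOURCE A (Python) =====
-- def _mask_string_literals(query: str) -> str:
--     masked: list[str] = []
--     quote: str | None = None
--     escaped = False
--     for char in query:
--         if quote:
--             if escaped:
--                 escaped = False
--             elif char == "\\":
--                 escaped = True
--             elif char == quote:
--                 quote = None
--                 masked.append(char)
--                 continue
--             masked.append(" ")
--         elif char in {"'", '"'}:
--             quote = char
--             masked.append(char)
--         else:
--             masked.append(char)
--     return "".join(masked)
-- ===== SOURCE B (Python) =====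
-- def _mask_string_literals(query: str) -> str:
--     out = []
--     i = 0
--     n = len(query)
--     while i < n:
--         c = query[i]
--         out.append(c)
--         i += 1
--         if c == "'" or c == '"':
--             # scan the literal body, masking it span-wise until the matching quote
--             while i < n:
--                 b = query[i]
--                 if b == "\\":
--                     # an escape consumes the backslash and the next char (if any), both masked
--                     out.append(" ")
--                     i += 1
--                     if i < n:
--                         out.append(" ")
--                         i += 1
--                 elif b == c:
--                     out.append(c)
--                     i += 1
--                     break
--                 else:
--                     out.append(" ")
--                     i += 1
--     return "".join(out)
-- ===== Notes on version B (the rewrite author's own statement) =====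
-- stated objective: alternative
-- what changed: Replaced the single-pass flag state machine (quote/escaped booleans) with a span-wise two-level scan: an outer loop copies text until an opening quote, then an inner loop masks the literal body, consuming each backslash escape pair in one step until the matching close quote.
import Mathlib
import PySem

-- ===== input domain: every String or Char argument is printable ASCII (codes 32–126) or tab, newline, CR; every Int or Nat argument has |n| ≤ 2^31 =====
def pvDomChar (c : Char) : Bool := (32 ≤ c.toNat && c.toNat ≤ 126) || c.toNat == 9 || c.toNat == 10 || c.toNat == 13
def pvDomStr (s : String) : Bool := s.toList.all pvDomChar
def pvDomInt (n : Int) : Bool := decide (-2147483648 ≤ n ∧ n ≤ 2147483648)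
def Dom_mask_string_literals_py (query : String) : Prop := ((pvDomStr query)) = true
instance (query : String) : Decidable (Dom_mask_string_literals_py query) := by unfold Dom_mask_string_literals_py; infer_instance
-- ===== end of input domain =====

-- B replaces A's char-by-char flag state machine (quote/escaped booleans) by a span-wise
-- two-level scan that, after an opening quote, masks the literal body consuming escape
-- pairs in one step; alternative decomposition, same cost.


-- ===== PORT A =====
-- A's loop over the characters with state (quote : Option Char, escaped : Bool),
-- transcribed as the structural recursion over the character list.
def maskA : List Char → Option Char → Bool → List Char
  | [], _, _ => []
  | c :: rest, quote, escaped =>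
    match quote with
    | some q =>
      if escaped then ' ' :: maskA rest (some q) false
      else if c = '\\' then ' ' :: maskA rest (some q) true
      else if c = q then c :: maskA rest none false
      else ' ' :: maskA rest (some q) false
    | none =>
      if c = '\'' ∨ c = '"' then c :: maskA rest (some c) false
      else c :: maskA rest none false

def mask_string_literals_py (query : String) : String :=
  String.ofList (maskA query.toList none false)

-- ===== PORT B =====
mutual
  -- inner loop: inside a literal opened by q
  def maskBIn (q : Char) : List Char → List Char
    | [] => []
    | b :: rest =>
      if b = '\\' then
        match rest with
        | [] => [' ']
        | _ :: rest' => ' ' :: ' ' :: maskBIn q rest'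
      else if b = q then q :: maskBOut rest
      else ' ' :: maskBIn q rest
  -- outer loop: outside any literal
  def maskBOut : List Char → List Char
    | [] => []
    | c :: rest => if c = '\'' ∨ c = '"' then c :: maskBIn c rest else c :: maskBOut rest
end

def mask_string_literals_py_alt (query : String) : String :=
  String.ofList (maskBOut query.toList)

-- ===== PRECONDITION & SPEC =====
def Spec_mask_string_literals_py (query : String) (out : String) : Prop := out = mask_string_literals_py_alt query
instance (query : String) (out : String) : Decidable (Spec_mask_string_literals_py query out) := by unfold Spec_mask_string_literals_py; infer_instance

-- ===== CLAIM (what is proved, stated in full; the proofs are below) =====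
def Claim_equal_mask_string_literals_py : Prop := ∀ (query : String), Dom_mask_string_literals_py query → Spec_mask_string_literals_py query (mask_string_literals_py query)

-- ===== LEMMAS AND PROOFS =====

-- B's two loops compute A's state machine from the corresponding states; strong
-- induction on the length because B's escape step consumes two characters at once.
theorem maskB_eq (n : Nat) : ∀ l : List Char, l.length ≤ n →
    maskBOut l = maskA l none false ∧ ∀ q, maskBIn q l = maskA l (some q) false := by
  induction n with
  | zero =>
    intro l hl
    have : l = [] := List.eq_nil_of_length_eq_zero (Nat.le_zero.mp hl)
    subst this
    simp [maskBOut, maskBIn, maskA]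
  | succ n ih =>
    intro l hl
    cases l with
    | nil => simp [maskBOut, maskBIn, maskA]
    | cons c rest =>
      have hrest : rest.length ≤ n := by simpa using Nat.le_of_succ_le_succ hl
      constructor
      · by_cases h : c = '\'' ∨ c = '"'
        · simp only [maskBOut, maskA, if_pos h, (ih rest hrest).2]
        · simp only [maskBOut, maskA, if_neg h, (ih rest hrest).1]
      · intro q
        by_cases hb : c = '\\'
        · cases rest with
          | nil => simp [maskBIn, maskA, hb]
          | cons b' rest' =>
            have h' : rest'.length ≤ n := by
              simp only [List.length_cons] at hl; omega
            simp [maskBIn, maskA, hb, (ih rest' h').2]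
        · by_cases hq : c = q
          · subst hq
            rw [maskBIn.eq_def]
            simp [maskA, hb, (ih rest hrest).1]
          · rw [maskBIn.eq_def]
            simp [maskA, hb, hq, (ih rest hrest).2]

-- ===== VERDICT (by name: the statement is the Claim_ definition above) =====
theorem mask_string_literals_py_spec : Claim_equal_mask_string_literals_py := by
  intro query _
  unfold Spec_mask_string_literals_py mask_string_literals_py mask_string_literals_py_alt
  rw [(maskB_eq query.toList.length query.toList le_rfl).1]
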